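-- pv_equiv track=rewrite | github.com/pypi-data/pypi-mirror-1 | packages/babtools_gnutella/babtools_gnutella-0.1.tar.gz/babtools_gnutella-0.1/babtools_gnutella.py | keywords_from_files
-- ===== SOURCE A (Python) =====
-- def keywords_from_files(filenames):
--     """Get a list of keywords from a list of filenames.
--
--     @param files: A list of names of files.
--     @type files: A list of Strings
--     @returns: A set() of keywords.
--
--     Doctests:
--         >>> from os import listdir
--         >>> filenames = listdir(".")
--         >>> keywords_from_files(filenames)
--         set(['', 'gpl', 'e4p', 'babscript', 'setup', 'py', 'babtools', 'hgtags', 'EXAMPLE', 'Changelog', 'txt', 'hg'])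
--     """
--     #: A list of keywords.
--     keywords = filenames
--
--     # Now split each file into keywords.
--     #: Characters by which the filenames get splitt - short version for bloodspell
--     split_chars = ["_", ".", " ", "-", ",", "!", '"', "'", "?"]
--     #: A helper list for splitting keywords
--     tmp_keywords = []
--
--     for i in split_chars:
--     # Create the a list of keyword lists.
--         tmp_keywords = [word.split(i) for word in keywords]
--         # Empty the keywords
--         keywords = []
--         # And fill them with the new smaller keywords.
--         for wordlist in tmp_keywords:
--             keywords += wordlist
--
--     return set(keywords)
-- ===== SOURCE B (Python) =====
-- def keywords_from_files(filenames):
--     """Get the set of keywords from a list of filenames in one character-level pass."""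
--     delims = set('_. -,!"\'?')
--     out = set()
--     for name in filenames:
--         start = 0
--         for i, ch in enumerate(name):
--             if ch in delims:
--                 out.add(name[start:i])
--                 start = i + 1
--         out.add(name[start:])
--     return out
-- ===== Notes on version B (the rewrite author's own statement) =====
-- stated objective: faster
-- what changed: A makes nine whole-list passes, splitting every current keyword on one delimiter per pass and re-flattening; B scans each filename once, character by character, cutting a token whenever the character is one of the nine delimiters and adding it to the set immediately.
import Mathlib
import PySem

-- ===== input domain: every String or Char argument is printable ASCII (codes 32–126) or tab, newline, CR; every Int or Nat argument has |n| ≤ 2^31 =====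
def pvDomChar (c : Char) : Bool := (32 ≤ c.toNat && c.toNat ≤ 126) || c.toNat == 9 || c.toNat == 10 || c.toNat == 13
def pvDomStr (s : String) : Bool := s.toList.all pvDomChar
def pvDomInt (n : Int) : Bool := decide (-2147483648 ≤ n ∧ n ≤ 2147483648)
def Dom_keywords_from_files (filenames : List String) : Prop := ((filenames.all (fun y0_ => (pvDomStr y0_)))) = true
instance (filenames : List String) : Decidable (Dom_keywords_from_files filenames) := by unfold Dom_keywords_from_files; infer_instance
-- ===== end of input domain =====

-- B replaces A's nine whole-list split-and-flatten passes by a single character-level scan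
-- of each filename that cuts a token at any of the nine delimiters.

-- ===== PORT A =====
-- word.split(i) for A's one-character separators i (all nonempty, so Python never raises);
-- exact: s.split(sep) with sep ≠ "" is PySem.Chars.splitOn on the code points.
def pySplit1 (w sep : String) : List String :=
  (PySem.Chars.splitOn w.toList sep.toList).map String.ofList

def keywords_from_files (filenames : List String) : List String :=
  -- keywords = filenames
  let keywords := filenames
  -- split_chars = ["_", ".", " ", "-", ",", "!", '"', "'", "?"]
  let split_chars : List String := ["_", ".", " ", "-", ",", "!", "\"", "'", "?"]
  -- for i in split_chars: tmp_keywords = [word.split(i) for word in keywords]; keywords = []; for wordlist in tmp_keywords: keywords += wordlist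
  let keywords := split_chars.foldl
    (fun keywords i =>
      let tmp_keywords := keywords.map (fun word => pySplit1 word i)
      tmp_keywords.foldl (fun keywords wordlist => keywords ++ wordlist) [])
    keywords
  -- return set(keywords)
  PySem.Set.ofList keywords

-- ===== PORT B =====
-- delims = set('_. -,!"\'?')
def pvDelims : PySem.Set Char := PySem.Set.ofList "_. -,!\"'?".toList

def keywords_from_files_alt (filenames : List String) : List String :=
  -- out = set(); for name in filenames: scan name's characters, cutting a token at each delimiter
  filenames.foldl
    (fun out name =>
      -- tok = ''; for ch in name: if ch in delims: out.add(tok); tok = '' else: tok += ch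
      let p := name.toList.foldl
        (fun (p : PySem.Set String × List Char) ch =>
          if PySem.Set.contains pvDelims ch then (PySem.Set.add p.1 (String.ofList p.2), [])
          else (p.1, p.2 ++ [ch]))
        (out, [])
      -- out.add(tok)
      PySem.Set.add p.1 (String.ofList p.2))
    PySem.Set.empty

-- ===== PRECONDITION & SPEC =====
def Spec_keywords_from_files (filenames : List String) (out : List String) : Prop := out = keywords_from_files_alt filenames
instance (filenames : List String) (out : List String) : Decidable (Spec_keywords_from_files filenames out) := by unfold Spec_keywords_from_files; infer_instance

-- ===== CLAIM (what is proved, stated in full; the proofs are below) =====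
def Claim_equal_keywords_from_files : Prop := ∀ (filenames : List String), Dom_keywords_from_files filenames → Spec_keywords_from_files filenames (keywords_from_files filenames)

-- ===== LEMMAS AND PROOFS =====

-- the delimiter predicate both sides reduce to
def pvIsDelim (ch : Char) : Bool := PySem.Set.contains pvDelims ch

-- PySem.Chars.splitOn with a single-character separator is List.splitOnP on equality with it
lemma pv_go_single (c : Char) : ∀ (fuel : Nat) (l cur : List Char) (acc : List (List Char)),
    l.length < fuel →
    PySem.Chars.splitOn.go [c] fuel l cur acc
      = acc.reverse ++ (l.splitOnP (· == c)).modifyHead (cur.reverse ++ ·) := by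
  intro fuel
  induction fuel with
  | zero => intro l cur acc h; omega
  | succ f ih =>
    intro l cur acc h
    cases l with
    | nil =>
      simp [PySem.Chars.splitOn.go, List.splitOnP_nil]
    | cons x rest =>
      rw [PySem.Chars.splitOn.go]
      by_cases hx : x = c
      · subst hx
        have hpre : List.isPrefixOf [x] (x :: rest) = true := by simp [List.isPrefixOf]
        simp only [hpre, if_pos, List.length_cons, List.length_nil, List.drop_succ_cons, List.drop_zero]
        rw [ih rest [] (cur.reverse :: acc) (by simpa using Nat.lt_of_succ_lt_succ h)]
        simp [List.splitOnP_cons]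
        exact congrFun List.modifyHead_id _
      · have hpre : List.isPrefixOf [c] (x :: rest) = false := by
          simp [List.isPrefixOf]; exact fun hcx => (hx hcx.symm).elim
        simp only [hpre, Bool.false_eq_true, if_neg, not_false_iff]
        rw [ih rest (x :: cur) acc (by simpa using Nat.lt_of_succ_lt_succ h)]
        rw [List.splitOnP_cons]
        have : (x == c) = false := by simp [hx]
        simp only [this, Bool.false_eq_true, if_neg, not_false_iff]
        rw [List.modifyHead_modifyHead]
        congr 1
        congr 1
        funext t
        simp [Function.comp]

lemma pv_splitOn_single (c : Char) (l : List Char) :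
    PySem.Chars.splitOn l [c] = l.splitOnP (· == c) := by
  rw [PySem.Chars.splitOn, pv_go_single c _ _ _ _ (by simp)]
  simp
  exact congrFun List.modifyHead_id _

-- splitting each piece again is splitting on the disjunction of the predicates
lemma pv_splitOnP_flatMap (p q : Char → Bool) (l : List Char) :
    (l.splitOnP p).flatMap (List.splitOnP q) = l.splitOnP (fun x => p x || q x) := by
  induction l with
  | nil => simp [List.splitOnP_nil]
  | cons x l ih =>
    rw [List.splitOnP_cons, List.splitOnP_cons]
    by_cases hp : p x
    · simp only [hp, if_pos, Bool.true_or, if_pos]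
      simp [List.splitOnP_nil, ← ih]
    · have hp' : p x = false := by simpa using hp
      obtain ⟨t, ts, hts⟩ := List.exists_cons_of_ne_nil (List.splitOnP_ne_nil p l)
      by_cases hq : q x
      · simp only [hp', Bool.false_eq_true, if_neg, not_false_iff, hq, Bool.false_or, if_pos]
        rw [hts, List.modifyHead_cons, List.flatMap_cons, List.splitOnP_cons]
        simp only [hq, if_pos]
        rw [← ih, hts, List.flatMap_cons]
        simp
      · have hq' : q x = false := by simpa using hq
        simp only [hp', hq', Bool.false_or, Bool.false_eq_true, if_neg, not_false_iff]
        rw [hts, List.modifyHead_cons, List.flatMap_cons, List.splitOnP_cons]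
        simp only [hq', Bool.false_eq_true, if_neg, not_false_iff]
        rw [← ih, hts, List.flatMap_cons]
        obtain ⟨u, us, hus⟩ := List.exists_cons_of_ne_nil (List.splitOnP_ne_nil q t)
        rw [hus]
        simp

-- one pass of A's outer loop, on the flatMap normal form
lemma pv_stepA (c : Char) (P : Char → Bool) (names : List String) :
    ((names.flatMap (fun s => (s.toList.splitOnP P).map String.ofList)).map
        (fun word => pySplit1 word (String.ofList [c]))).foldl
      (fun keywords wordlist => keywords ++ wordlist) []
    = names.flatMap (fun s => (s.toList.splitOnP (fun x => P x || x == c)).map String.ofList) := by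
  rw [List.foldl_map]
  rw [PySem.List.foldl_append_eq_flatMap (fun word => pySplit1 word (String.ofList [c]))]
  rw [List.nil_append, List.flatMap_assoc]
  congr 1
  funext s
  rw [List.flatMap_map, ← pv_splitOnP_flatMap, List.map_flatMap]
  congr 1
  funext t
  simp [pySplit1, pv_splitOn_single]

-- A's whole outer loop, one separator character at a time
lemma pv_foldA : ∀ (cs : List Char) (P : Char → Bool) (names : List String),
    ((cs.map (fun c => String.ofList [c])).foldl
      (fun keywords i =>
        (keywords.map (fun word => pySplit1 word i)).foldl
          (fun keywords wordlist => keywords ++ wordlist) [])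
      (names.flatMap (fun s => (s.toList.splitOnP P).map String.ofList)))
    = names.flatMap (fun s => (s.toList.splitOnP (fun x => P x || cs.contains x)).map String.ofList) := by
  intro cs
  induction cs with
  | nil =>
    intro P names
    simp
  | cons c cs ih =>
    intro P names
    rw [List.map_cons, List.foldl_cons, pv_stepA, ih]
    congr 1
    funext s
    congr 1
    congr 1
    funext x
    rw [Bool.eq_iff_iff]
    simp
    tauto

-- B's inner scan, with the pending token generalized
lemma pv_scanB (l : List Char) : ∀ (acc : List Char) (out : PySem.Set String),
    (let p := l.foldl
        (fun (p : PySem.Set String × List Char) ch =>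
          if PySem.Set.contains pvDelims ch then (PySem.Set.add p.1 (String.ofList p.2), [])
          else (p.1, p.2 ++ [ch]))
        (out, acc)
     PySem.Set.add p.1 (String.ofList p.2))
    = ((l.splitOnP pvIsDelim).modifyHead (acc ++ ·)).foldl
        (fun s t => PySem.Set.add s (String.ofList t)) out := by
  induction l with
  | nil => intro acc out; simp [List.splitOnP_nil]
  | cons x l ih =>
    intro acc out
    rw [List.foldl_cons, List.splitOnP_cons]
    by_cases hx : PySem.Set.contains pvDelims x
    · have hd : pvIsDelim x = true := hx
      simp only [hx, if_pos, hd]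
      rw [ih [] (PySem.Set.add out (String.ofList acc))]
      rw [List.modifyHead_cons, List.foldl_cons]
      simp only [List.append_nil, List.nil_append]
      rw [show (List.modifyHead (fun x : List Char => x) (List.splitOnP pvIsDelim l)) = List.splitOnP pvIsDelim l from congrFun List.modifyHead_id _]
    · have hd : pvIsDelim x = false := by simpa [pvIsDelim] using hx
      simp only [hx, if_neg, hd, Bool.false_eq_true, not_false_iff]
      rw [ih (acc ++ [x]) out, List.modifyHead_modifyHead]
      congr 1
      congr 1
      funext t
      simp [Function.comp]

lemma pv_A_norm (filenames : List String) :
    keywords_from_files filenames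
      = PySem.Set.ofList (filenames.flatMap (fun s => (s.toList.splitOnP pvIsDelim).map String.ofList)) := by
  unfold keywords_from_files
  dsimp only
  rw [show (["_", ".", " ", "-", ",", "!", "\"", "'", "?"] : List String)
        = ['_', '.', ' ', '-', ',', '!', '"', '\'', '?'].map (fun c => String.ofList [c]) from rfl]
  have base : filenames
      = filenames.flatMap (fun s => ((s.toList.splitOnP (fun _ => false)).map String.ofList)) := by
    simp [List.splitOnP_eq_single]
  conv_lhs => rw [base]
  rw [pv_foldA]
  congr 2

lemma pv_B_norm (filenames : List String) :
    keywords_from_files_alt filenames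
      = filenames.foldl
          (fun out name => (name.toList.splitOnP pvIsDelim).foldl
            (fun s t => PySem.Set.add s (String.ofList t)) out)
          PySem.Set.empty := by
  unfold keywords_from_files_alt
  congr 1
  funext out name
  rw [pv_scanB]
  simp only [List.nil_append]
  rw [show (List.modifyHead (fun x : List Char => x) (List.splitOnP pvIsDelim name.toList)) = List.splitOnP pvIsDelim name.toList from congrFun List.modifyHead_id _]

-- ===== VERDICT (by name: the statement is the Claim_ definition above) =====
theorem keywords_from_files_spec : Claim_equal_keywords_from_files := by
  intro filenames _
  unfold Spec_keywords_from_files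
  rw [pv_A_norm, pv_B_norm, PySem.Set.ofList_eq_foldl, List.foldl_flatMap]
  simp only [List.foldl_map]
  rfl
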